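-- pv_equiv track=rewrite | github.com/pmasala/stratoterra | agents/scripts/agent_11_derived_metrics.py | parse_credit_rating
-- ===== SOURCE A (Python) =====
-- RATING_SPREAD = {
--     "AAA": 0, "AA+": 15, "AA": 25, "AA-": 40,
--     "A+": 55, "A": 70, "A-": 90,
--     "BBB+": 120, "BBB": 150, "BBB-": 200,
--     "BB+": 250, "BB": 300, "BB-": 375,
--     "B+": 450, "B": 550, "B-": 650,
--     "CCC+": 800, "CCC": 1000, "CCC-": 1200,
--     "CC": 1500, "C": 2000, "D": 3000, "SD": 3000,
--     "NR": None
-- }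
--
-- def parse_credit_rating(rating_str):
--     """Extract the best/most relevant rating from a credit rating string."""
--     if not rating_str:
--         return None
--     # Parse "S&P: AA+, Moody's: Aa1, Fitch: AAA" format
--     best_spread = None
--     for part in rating_str.split(","):
--         part = part.strip()
--         if ":" in part:
--             _, grade = part.split(":", 1)
--             grade = grade.strip()
--         else:
--             grade = part.strip()
--
--         # Convert Moody's to S&P equivalent
--         moody_map = {
--             "Aaa": "AAA", "Aa1": "AA+", "Aa2": "AA", "Aa3": "AA-",
--             "A1": "A+", "A2": "A", "A3": "A-",
--             "Baa1": "BBB+", "Baa2": "BBB", "Baa3": "BBB-",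
--             "Ba1": "BB+", "Ba2": "BB", "Ba3": "BB-",
--             "B1": "B+", "B2": "B", "B3": "B-",
--             "Caa1": "CCC+", "Caa2": "CCC", "Caa3": "CCC-",
--             "Ca": "CC", "C": "C",
--         }
--         grade = moody_map.get(grade, grade)
--
--         spread = RATING_SPREAD.get(grade)
--         if spread is not None:
--             if best_spread is None or spread < best_spread:
--                 best_spread = spread
--
--     return best_spread
-- ===== SOURCE B (Python) =====
-- # Different algorithm: instead of folding a running best over the tokens, build
-- # the token set once and scan a fixed priority table (all S&P and Moody's grades
-- # sorted by ascending spread), returning the spread of the first grade present.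
-- # Correct because the first table hit has the minimal spread among all hits, and
-- # the hits' spreads are exactly the spreads A collects ("NR" has no spread, so it
-- # simply has no table entry).
-- _GRADES_BY_SPREAD = [
--     ("AAA", 0), ("Aaa", 0),
--     ("AA+", 15), ("Aa1", 15),
--     ("AA", 25), ("Aa2", 25),
--     ("AA-", 40), ("Aa3", 40),
--     ("A+", 55), ("A1", 55),
--     ("A", 70), ("A2", 70),
--     ("A-", 90), ("A3", 90),
--     ("BBB+", 120), ("Baa1", 120),
--     ("BBB", 150), ("Baa2", 150),
--     ("BBB-", 200), ("Baa3", 200),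
--     ("BB+", 250), ("Ba1", 250),
--     ("BB", 300), ("Ba2", 300),
--     ("BB-", 375), ("Ba3", 375),
--     ("B+", 450), ("B1", 450),
--     ("B", 550), ("B2", 550),
--     ("B-", 650), ("B3", 650),
--     ("CCC+", 800), ("Caa1", 800),
--     ("CCC", 1000), ("Caa2", 1000),
--     ("CCC-", 1200), ("Caa3", 1200),
--     ("CC", 1500), ("Ca", 1500),
--     ("C", 2000),
--     ("D", 3000), ("SD", 3000),
-- ]
--
--
-- def _grade(part):
--     """Grade token of one comma-separated part ('S&P: AA+' -> 'AA+')."""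
--     part = part.strip()
--     if ":" in part:
--         _, grade = part.split(":", 1)
--         return grade.strip()
--     return part.strip()
--
--
-- def parse_credit_rating(rating_str):
--     """Extract the best/most relevant rating from a credit rating string."""
--     if not rating_str:
--         return None
--     tokens = {_grade(p) for p in rating_str.split(",")}
--     for grade, spread in _GRADES_BY_SPREAD:
--         if grade in tokens:
--             return spread
--     return None
-- ===== Notes on version B (the rewrite author's own statement) =====
-- stated objective: alternative
-- what changed: B inverts the traversal: instead of folding a running best spread over the tokens with two dictionary lookups each, it builds the set of grade tokens once and scans a fixed priority table of all grades sorted by ascending spread, returning at the first grade present in the set.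
import Mathlib
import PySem

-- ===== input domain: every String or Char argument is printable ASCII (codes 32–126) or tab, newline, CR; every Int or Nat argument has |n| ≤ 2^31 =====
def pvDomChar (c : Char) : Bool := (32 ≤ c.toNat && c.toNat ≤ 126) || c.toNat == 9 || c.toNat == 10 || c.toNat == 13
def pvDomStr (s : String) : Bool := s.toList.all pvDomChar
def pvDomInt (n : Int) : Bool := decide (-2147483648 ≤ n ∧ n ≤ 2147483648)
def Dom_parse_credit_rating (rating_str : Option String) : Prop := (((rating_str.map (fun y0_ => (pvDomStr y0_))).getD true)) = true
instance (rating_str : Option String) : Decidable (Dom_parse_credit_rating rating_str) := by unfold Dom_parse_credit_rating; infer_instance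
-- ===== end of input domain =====

-- B inverts the traversal: it builds the set of grade tokens once and scans a fixed
-- priority table of all grades sorted by ascending spread, returning at the first
-- grade present (objective: alternative algorithm, same cost).

-- ===== PORT A =====
def pvRatingSpread : PySem.Dict String (Option Int) := PySem.Dict.ofList [
  ("AAA", some 0), ("AA+", some 15), ("AA", some 25), ("AA-", some 40),
  ("A+", some 55), ("A", some 70), ("A-", some 90),
  ("BBB+", some 120), ("BBB", some 150), ("BBB-", some 200),
  ("BB+", some 250), ("BB", some 300), ("BB-", some 375),
  ("B+", some 450), ("B", some 550), ("B-", some 650),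
  ("CCC+", some 800), ("CCC", some 1000), ("CCC-", some 1200),
  ("CC", some 1500), ("C", some 2000), ("D", some 3000), ("SD", some 3000),
  ("NR", none)]

def pvMoodyMap : PySem.Dict String String := PySem.Dict.ofList [
  ("Aaa", "AAA"), ("Aa1", "AA+"), ("Aa2", "AA"), ("Aa3", "AA-"),
  ("A1", "A+"), ("A2", "A"), ("A3", "A-"),
  ("Baa1", "BBB+"), ("Baa2", "BBB"), ("Baa3", "BBB-"),
  ("Ba1", "BB+"), ("Ba2", "BB"), ("Ba3", "BB-"),
  ("B1", "B+"), ("B2", "B"), ("B3", "B-"),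
  ("Caa1", "CCC+"), ("Caa2", "CCC"), ("Caa3", "CCC-"),
  ("Ca", "CC"), ("C", "C")]

def parse_credit_rating (rating_str : Option String) : Option Int :=
  match rating_str with
  | none => none
  | some s =>
    if PySem.Str.len s = 0 then none
    else
      ((PySem.Str.split? s ",").getD []).foldl
        (fun best_spread part0 =>
          let part := PySem.Str.strip part0
          let grade0 :=
            if PySem.Str.isIn ":" part then
              -- '_, grade = part.split(":", 1)' then '.strip()'; the fallback arm is
              -- unreachable since ":" is in part, so the split has two pieces
              match PySem.Str.splitMax? part ":" 1 with
              | some (_ :: g :: _) => PySem.Str.strip g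
              | _ => PySem.Str.strip part
            else PySem.Str.strip part
          let grade := pvMoodyMap.getD grade0 grade0
          let spread := pvRatingSpread.getD grade none
          match spread with
          | none => best_spread
          | some v =>
            match best_spread with
            | none => some v
            | some b => if v < b then some v else some b)
        none

-- ===== PORT B =====
-- all grades (S&P and Moody's) sorted by ascending spread, Source B's _GRADES_BY_SPREAD
def pvBySpread : List (String × Int) := [
  ("AAA", 0), ("Aaa", 0),
  ("AA+", 15), ("Aa1", 15),
  ("AA", 25), ("Aa2", 25),
  ("AA-", 40), ("Aa3", 40),
  ("A+", 55), ("A1", 55),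
  ("A", 70), ("A2", 70),
  ("A-", 90), ("A3", 90),
  ("BBB+", 120), ("Baa1", 120),
  ("BBB", 150), ("Baa2", 150),
  ("BBB-", 200), ("Baa3", 200),
  ("BB+", 250), ("Ba1", 250),
  ("BB", 300), ("Ba2", 300),
  ("BB-", 375), ("Ba3", 375),
  ("B+", 450), ("B1", 450),
  ("B", 550), ("B2", 550),
  ("B-", 650), ("B3", 650),
  ("CCC+", 800), ("Caa1", 800),
  ("CCC", 1000), ("Caa2", 1000),
  ("CCC-", 1200), ("Caa3", 1200),
  ("CC", 1500), ("Ca", 1500),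
  ("C", 2000),
  ("D", 3000), ("SD", 3000)]

def pvGrade (part0 : String) : String :=
  let part := PySem.Str.strip part0
  if PySem.Str.isIn ":" part then
    -- '_, grade = part.split(":", 1)' then '.strip()'; only the last arm is
    -- reachable since ":" is in part, so the split has two pieces
    match PySem.Str.splitMax? part ":" 1 with
    | none => PySem.Str.strip part
    | some [] => PySem.Str.strip part
    | some [_] => PySem.Str.strip part
    | some (_ :: g :: _) => PySem.Str.strip g
  else PySem.Str.strip part

def parse_credit_rating_alt (rating_str : Option String) : Option Int :=
  match rating_str with
  | some s =>
    if PySem.Str.len s = 0 then none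
    else
      let tokens : PySem.Set String :=
        PySem.Set.ofList (((PySem.Str.split? s ",").getD []).map pvGrade)
      -- 'for grade, spread in _GRADES_BY_SPREAD: if grade in tokens: return spread'
      (pvBySpread.find? (fun e => PySem.Set.contains tokens e.1)).map Prod.snd
  | none => none

-- ===== PRECONDITION & SPEC =====
def Spec_parse_credit_rating (rating_str : Option String) (out : Option Int) : Prop := out = parse_credit_rating_alt rating_str
instance (rating_str : Option String) (out : Option Int) : Decidable (Spec_parse_credit_rating rating_str out) := by unfold Spec_parse_credit_rating; infer_instance

-- ===== CLAIM (what is proved, stated in full; the proofs are below) =====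
def Claim_equal_parse_credit_rating : Prop := ∀ (rating_str : Option String), Dom_parse_credit_rating rating_str → Spec_parse_credit_rating rating_str (parse_credit_rating rating_str)

-- ===== LEMMAS AND PROOFS =====

-- the two dictionaries, written as their underlying item lists
set_option maxRecDepth 16384 in
lemma pv_moody_mk : pvMoodyMap = PySem.Dict.mk [
    ("Aaa", "AAA"), ("Aa1", "AA+"), ("Aa2", "AA"), ("Aa3", "AA-"),
    ("A1", "A+"), ("A2", "A"), ("A3", "A-"),
    ("Baa1", "BBB+"), ("Baa2", "BBB"), ("Baa3", "BBB-"),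
    ("Ba1", "BB+"), ("Ba2", "BB"), ("Ba3", "BB-"),
    ("B1", "B+"), ("B2", "B"), ("B3", "B-"),
    ("Caa1", "CCC+"), ("Caa2", "CCC"), ("Caa3", "CCC-"),
    ("Ca", "CC"), ("C", "C")] := rfl

set_option maxRecDepth 16384 in
lemma pv_spread_mk : pvRatingSpread = PySem.Dict.mk [
    ("AAA", some 0), ("AA+", some 15), ("AA", some 25), ("AA-", some 40),
    ("A+", some 55), ("A", some 70), ("A-", some 90),
    ("BBB+", some 120), ("BBB", some 150), ("BBB-", some 200),
    ("BB+", some 250), ("BB", some 300), ("BB-", some 375),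
    ("B+", some 450), ("B", some 550), ("B-", some 650),
    ("CCC+", some 800), ("CCC", some 1000), ("CCC-", some 1200),
    ("CC", some 1500), ("C", some 2000), ("D", some 3000), ("SD", some 3000),
    ("NR", none)] := rfl

-- every grade of the priority table is a key of one of A's two dictionaries
set_option maxRecDepth 100000 in
lemma pv_byspread_keys :
    pvBySpread.all (fun e => pvMoodyMap.contains e.1 || pvRatingSpread.contains e.1) = true := by
  decide

-- the priority table is sorted by ascending spread
set_option maxRecDepth 100000 in
lemma pv_byspread_sorted : pvBySpread.Pairwise (fun a b => a.2 ≤ b.2) := by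
  decide

-- A's "Moody's remap then spread lookup" = first-match lookup in the priority table
set_option maxRecDepth 100000 in
set_option maxHeartbeats 1600000 in
lemma pv_lookup (g : String) :
    pvRatingSpread.getD (pvMoodyMap.getD g g) none
      = (pvBySpread.find? (fun e => e.1 == g)).map Prod.snd := by
  by_cases hm : pvMoodyMap.contains g = true
  · have hm' : "Aaa" = g ∨ "Aa1" = g ∨ "Aa2" = g ∨ "Aa3" = g ∨ "A1" = g ∨ "A2" = g ∨ "A3" = g ∨ "Baa1" = g ∨ "Baa2" = g ∨ "Baa3" = g ∨ "Ba1" = g ∨ "Ba2" = g ∨ "Ba3" = g ∨ "B1" = g ∨ "B2" = g ∨ "B3" = g ∨ "Caa1" = g ∨ "Caa2" = g ∨ "Caa3" = g ∨ "Ca" = g ∨ "C" = g := by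
      rw [pv_moody_mk, PySem.Dict.contains_mk] at hm
      simpa using hm
    rcases hm' with rfl|rfl|rfl|rfl|rfl|rfl|rfl|rfl|rfl|rfl|rfl|rfl|rfl|rfl|rfl|rfl|rfl|rfl|rfl|rfl|rfl <;> decide
  · rw [show pvMoodyMap.getD g g = g from
        PySem.Dict.getD_of_not_contains _ _ (by simpa using hm)]
    by_cases hr : pvRatingSpread.contains g = true
    · have hr' : "AAA" = g ∨ "AA+" = g ∨ "AA" = g ∨ "AA-" = g ∨ "A+" = g ∨ "A" = g ∨ "A-" = g ∨ "BBB+" = g ∨ "BBB" = g ∨ "BBB-" = g ∨ "BB+" = g ∨ "BB" = g ∨ "BB-" = g ∨ "B+" = g ∨ "B" = g ∨ "B-" = g ∨ "CCC+" = g ∨ "CCC" = g ∨ "CCC-" = g ∨ "CC" = g ∨ "C" = g ∨ "D" = g ∨ "SD" = g ∨ "NR" = g := by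
        rw [pv_spread_mk, PySem.Dict.contains_mk] at hr
        simpa using hr
      rcases hr' with rfl|rfl|rfl|rfl|rfl|rfl|rfl|rfl|rfl|rfl|rfl|rfl|rfl|rfl|rfl|rfl|rfl|rfl|rfl|rfl|rfl|rfl|rfl|rfl <;> decide
    · rw [show pvRatingSpread.getD g none = none from
          PySem.Dict.getD_of_not_contains _ _ (by simpa using hr)]
      rw [show pvBySpread.find? (fun e => e.1 == g) = none from ?_]
      · rfl
      · rw [List.find?_eq_none]
        intro e he hbe
        have hkey := List.all_eq_true.mp pv_byspread_keys e he
        have : e.1 = g := by simpa using hbe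
        rw [this] at hkey
        rw [Bool.or_eq_true] at hkey
        rcases hkey with h | h
        · exact hm h
        · exact hr h

-- B's grade helper written with A's two-arm match on the split
lemma pv_grade_eq (p : String) :
    pvGrade p
      = (let part := PySem.Str.strip p
         if PySem.Str.isIn ":" part then
           match PySem.Str.splitMax? part ":" 1 with
           | some (_ :: g :: _) => PySem.Str.strip g
           | _ => PySem.Str.strip part
         else PySem.Str.strip part) := by
  unfold pvGrade
  dsimp only
  split_ifs with h
  · rcases PySem.Str.splitMax? (PySem.Str.strip p) ":" 1 with _ | ⟨_ | ⟨a, _ | ⟨b, l⟩⟩⟩ <;> rfl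
  · rfl

-- A's loop body equals "priority-table lookup at the part's grade, folded with min"
set_option maxHeartbeats 1600000 in
lemma pv_step_eq :
    (fun (best_spread : Option Int) (part0 : String) =>
          let part := PySem.Str.strip part0
          let grade0 :=
            if PySem.Str.isIn ":" part then
              match PySem.Str.splitMax? part ":" 1 with
              | some (_ :: g :: _) => PySem.Str.strip g
              | _ => PySem.Str.strip part
            else PySem.Str.strip part
          let grade := pvMoodyMap.getD grade0 grade0
          let spread := pvRatingSpread.getD grade none
          match spread with
          | none => best_spread
          | some v =>
            match best_spread with
            | none => some v
            | some b => if v < b then some v else some b)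
      = (fun best p =>
          match (pvBySpread.find? (fun e => e.1 == pvGrade p)).map Prod.snd with
          | none => best
          | some v =>
            match best with
            | none => some v
            | some b => if v < b then some v else some b) := by
  funext best p
  rw [← pv_lookup, pv_grade_eq]

-- fold-with-running-best over the parts = fold of min over the collected spreads
lemma pv_fold_min (f : String → Option Int) (l : List String) (b : Option Int) :
    l.foldl
        (fun best p =>
          match f p with
          | none => best
          | some v =>
            match best with
            | none => some v
            | some b0 => if v < b0 then some v else some b0)
        b
      = (l.filterMap f).foldl
          (fun acc x =>
            match acc with
            | none => some x
            | some m => if x < m then some x else some m)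
          b := by
  induction l generalizing b with
  | nil => rfl
  | cons p t ih =>
    simp only [List.foldl_cons, List.filterMap_cons]
    cases hf : f p with
    | none => exact ih b
    | some v =>
      simp only [List.foldl_cons]
      exact ih _

lemma pv_fold_min' (f : String → Option Int) (l : List String) :
    l.foldl
        (fun best p =>
          match f p with
          | none => best
          | some v =>
            match best with
            | none => some v
            | some b0 => if v < b0 then some v else some b0)
        none
      = PySem.List.min? (l.filterMap f) (fun x => x) := by
  rw [pv_fold_min]
  unfold PySem.List.min?
  congr 1
  funext acc x
  cases acc <;> rfl

lemma pv_filterMap_congr {α β : Type} (f g : α → Option β) (l : List α)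
    (h : ∀ a ∈ l, f a = g a) : l.filterMap f = l.filterMap g := by
  induction l with
  | nil => rfl
  | cons a t ih =>
    simp only [List.filterMap_cons, h a (List.mem_cons_self ..),
      ih (fun x hx => h x (List.mem_cons_of_mem _ hx))]

-- heart of the equivalence: min of the looked-up spreads = first hit in a table
-- sorted by ascending spread
lemma pv_scan_min (T : List (String × Int)) (hT : T.Pairwise (fun a b => a.2 ≤ b.2))
    (l : List String) :
    PySem.List.min? (l.filterMap (fun g => (T.find? (fun e => e.1 == g)).map Prod.snd))
        (fun x => x)
      = (T.find? (fun e => l.contains e.1)).map Prod.snd := by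
  induction T with
  | nil =>
    simp [PySem.List.min?]
  | cons e T ih =>
    by_cases hc : l.contains e.1
    · have hmemf : (e.2 : Int) ∈
          l.filterMap (fun g => ((e :: T).find? (fun e' => e'.1 == g)).map Prod.snd) := by
        refine List.mem_filterMap.mpr ⟨e.1, by simpa using hc, ?_⟩
        rw [List.find?_cons_of_pos (by simp)]
        rfl
      rw [List.find?_cons_of_pos (by simpa using hc)]
      cases hmin : PySem.List.min?
          (l.filterMap (fun g => ((e :: T).find? (fun e' => e'.1 == g)).map Prod.snd))
          (fun x => x) with
      | none =>
        have := (PySem.List.min?_eq_none_iff _ _).mp hmin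
        rw [this] at hmemf
        exact absurd hmemf (List.not_mem_nil)
      | some m =>
        have hle : m ≤ e.2 := PySem.List.min?_isMin hmin _ hmemf
        have hm := PySem.List.min?_mem hmin
        obtain ⟨g, hg, hfg⟩ := List.mem_filterMap.mp hm
        obtain ⟨e', hfind, rfl⟩ := Option.map_eq_some_iff.mp hfg
        have he' := List.mem_of_find?_eq_some hfind
        have hge : e.2 ≤ e'.2 := by
          rcases List.mem_cons.mp he' with rfl | h
          · exact le_refl _
          · exact (List.pairwise_cons.mp hT).1 e' h
        simp only [Option.map_some]
        exact congrArg some (le_antisymm hle hge)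
    · have hne : ∀ g ∈ l, ((e :: T).find? (fun e' => e'.1 == g)).map Prod.snd
          = (T.find? (fun e' => e'.1 == g)).map Prod.snd := by
        intro g hg
        have : (e.1 == g) = false := by
          simp only [beq_eq_false_iff_ne, ne_eq]
          rintro rfl
          exact hc (by simpa using hg)
        rw [List.find?_cons_of_neg (by simp [this])]
      rw [pv_filterMap_congr _ _ _ hne,
        List.find?_cons_of_neg (by simpa using hc),
        ih (List.pairwise_cons.mp hT).2]

set_option maxHeartbeats 1600000 in
lemma pv_fm (l : List String) :
    l.filterMap (fun p => (pvBySpread.find? (fun e => e.1 == pvGrade p)).map Prod.snd)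
      = (l.map pvGrade).filterMap (fun g => (pvBySpread.find? (fun e => e.1 == g)).map Prod.snd) := by
  induction l with
  | nil => rfl
  | cons p t ih => rw [List.map_cons, List.filterMap_cons, List.filterMap_cons, ih]

lemma pv_set_contains (L : List String) (g : String) :
    (PySem.Set.ofList L).contains g = L.contains g := by
  by_cases h : g ∈ L <;> simp [h, PySem.Set.mem_ofList]

-- ===== VERDICT (by name: the statement is the Claim_ definition above) =====
set_option maxRecDepth 100000 in
theorem parse_credit_rating_spec : Claim_equal_parse_credit_rating := by
  intro rs _
  show parse_credit_rating rs = parse_credit_rating_alt rs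
  cases rs with
  | none => rfl
  | some s =>
    simp only [parse_credit_rating, parse_credit_rating_alt]
    by_cases h : PySem.Str.len s = 0
    · rw [if_pos h, if_pos h]
    · rw [if_neg h, if_neg h, pv_step_eq,
        pv_fold_min' (fun p => (pvBySpread.find? (fun e => e.1 == pvGrade p)).map Prod.snd),
        pv_fm,
        pv_scan_min pvBySpread pv_byspread_sorted,
        show (fun e : String × Int =>
            (PySem.Set.ofList (((PySem.Str.split? s ",").getD []).map pvGrade)).contains e.1)
          = (fun e : String × Int =>
            (((PySem.Str.split? s ",").getD []).map pvGrade).contains e.1)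
          from funext fun e => pv_set_contains _ _]
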